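-- pv_equiv track=rewrite | github.com/Apgoldberg1/primecity | primetests.py | dihedral
-- ===== SOURCE A (Python) =====
-- import math
--
-- def prime(number):
--     #checks if number has only factors of 1 and itself
--     factors = []
--     factorsum = 0
--     for i in range(math.floor(number / 2)):
--         if number % (i + 1) == 0:
--             factors.append(i + 1)
--     for l in range(len(factors)):
--         factorsum += factors[l]
--     if factorsum == 1:
--         return True
--     else:
--         return False
--
-- def upsidedown(number):
--   #flips number upside down if possible on a 7 seg display
--   strnumber = str(number)
--   strlist = []
--   for char in strnumber:
--     strlist.append(int(char))
--   for digit in range(len(strnumber)):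
--     if strnumber[digit] == '4' or strnumber[digit] == '3' or strnumber[digit] == '9' or strnumber[digit] == '7' or strnumber[digit] == '6':
--       return False
--     elif strlist[digit] == 5:
--       strlist[digit] = 2
--     elif strlist[digit] == 2:
--       strlist[digit] = 5
--   strnumber = ''
--   for i in strlist:
--     strnumber+=str(i)
--   return int(strnumber)
--
-- def dihedral(number):
--   #checks if a prime is dihedral meaning it as a 7 segment display upside down, flipped, and upside down and flipped are all prime
--   reverse = ''
--   strnumber = str(number)
--   for i in range(len(strnumber)):
--     reverse += strnumber[-(i+1)]
--   if prime(int(reverse)) and prime(upsidedown(number)) and prime(upsidedown(reverse)) and prime(number):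
--     return True
--   else:
--     return False
-- ===== SOURCE B (Python) =====
-- FLIP = {'0': '0', '1': '1', '2': '5', '5': '2', '8': '8'}
--
-- def _isprime(n):
--     # trial division up to sqrt(n)
--     if n < 2:
--         return False
--     if n % 2 == 0:
--         return n == 2
--     d = 3
--     while d * d <= n:
--         if n % d == 0:
--             return False
--         d += 2
--     return True
--
-- def dihedral(number):
--     s = str(number)
--     if any(c not in FLIP for c in s):
--         return False
--     rev = int(s[::-1])
--     ud = int(''.join(FLIP[c] for c in s))
--     udrev = int(''.join(FLIP[c] for c in s[::-1]))
--     return _isprime(number) and _isprime(rev) and _isprime(ud) and _isprime(udrev)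
-- ===== Notes on version B (the rewrite author's own statement) =====
-- stated objective: faster
-- what changed: B first rejects numbers containing a non-flippable digit (so the four primality tests are skipped entirely), and replaces A's divisor-sum primality test that scans all of 1..n/2 with trial division by 2 and odd d up to sqrt(n).
-- crash fix: On negative numbers A raises ValueError (int of the reversed string '...-'); B returns False since '-' is not a flippable character. — e.g. on dihedral(-2): A raises ValueError, B returns false
import Mathlib
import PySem

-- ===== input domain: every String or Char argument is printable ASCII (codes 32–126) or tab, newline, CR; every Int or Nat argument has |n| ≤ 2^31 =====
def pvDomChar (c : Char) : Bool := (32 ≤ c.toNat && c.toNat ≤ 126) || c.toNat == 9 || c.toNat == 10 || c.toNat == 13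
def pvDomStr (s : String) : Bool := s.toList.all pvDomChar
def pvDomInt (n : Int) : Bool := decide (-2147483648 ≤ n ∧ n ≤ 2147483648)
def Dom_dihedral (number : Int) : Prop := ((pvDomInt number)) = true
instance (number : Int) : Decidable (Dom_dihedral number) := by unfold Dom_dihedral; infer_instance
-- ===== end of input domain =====

-- B replaces A's O(n) divisor-sum primality test by trial division up to sqrt(n) and rejects
-- non-flippable digits up front; equivalence is on the return value for number >= 0 (A raises below 0).

-- ===== PORT A =====

-- prime(number): collect all divisors in 1..number//2, sum them, compare with 1.
-- math.floor(number/2) equals floor division exactly for |number| <= 2^31 (float is exact there).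
def primeA (number : Int) : Bool :=
  let factors : List Int :=
    List.foldl (fun fs i => if PySem.Int.mod number (i + 1) = 0 then fs ++ [i + 1] else fs)
      [] (PySem.List.pyRange 0 (PySem.Int.floordiv number 2))
  let factorsum : Int :=
    List.foldl (fun s l => s + PySem.List.pyGetD factors l 0) 0
      (PySem.List.pyRange 0 (PySem.List.len factors))
  factorsum == 1

-- the digit loop of upsidedown: early `return False` becomes none; strlist entries 5<->2 swapped
def udGoA : List (Char × Int) → Option (List Int)
  | [] => some []
  | (c, v) :: rest =>
      if c = '4' ∨ c = '3' ∨ c = '9' ∨ c = '7' ∨ c = '6' then none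
      else
        match udGoA rest with
        | none => none
        | some l => some ((if v = 5 then 2 else if v = 2 then 5 else v) :: l)

-- upsidedown(strnumber); none = Python's `return False` (prime(False) computes as prime(0) at
-- every call site, since range(math.floor(False/2)) is empty) or an unparseable final string.
-- int(char) is ported as code point minus 48, exact for the digit strings all call sites pass.
def upsidedownA (strnumber : List Char) : Option Int :=
  let strlist := strnumber.map (fun c => ((c.toNat : Int) - 48))
  match udGoA (strnumber.zip strlist) with
  | none => none
  | some lst => PySem.Int.ofChars? (lst.foldl (fun acc i => acc ++ PySem.Int.toChars i) [])

def dihedral (number : Int) : Bool :=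
  let strnumber := PySem.Int.toChars number
  -- reverse += strnumber[-(i+1)] for i in range(len(strnumber)); index always in range
  let reverse :=
    List.foldl (fun acc i => acc ++ [PySem.List.pyGetD strnumber (-(i + 1)) ' '])
      [] (PySem.List.pyRange 0 (PySem.List.len strnumber))
  -- int(reverse) raises ValueError for negative number ('-' at the end): outside Pre_
  match PySem.Int.ofChars? reverse with
  | none => false
  | some revInt =>
      primeA revInt && primeA ((upsidedownA strnumber).getD 0) &&
        primeA ((upsidedownA reverse).getD 0) && primeA number

-- ===== PORT B =====

-- FLIP = {'0':'0','1':'1','2':'5','5':'2','8':'8'} (dict -> association list)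
def flipB : List (Char × List Char) :=
  [('0', ['0']), ('1', ['1']), ('2', ['5']), ('5', ['2']), ('8', ['8'])]

-- while d*d <= n: if n % d == 0: return False; d += 2
def isprimeGoB (n d : Int) : Bool :=
  if d * d ≤ n then
    if PySem.Int.mod n d = 0 then false else isprimeGoB n (d + 2)
  else true
  termination_by (n + 1 - d).toNat
  decreasing_by
    have h0 : 0 ≤ n := le_trans (mul_self_nonneg d) ‹d * d ≤ n›
    have h1 : 2 * d - 1 ≤ n := by nlinarith [mul_self_nonneg (d - 1), ‹d * d ≤ n›]
    omega

def isprimeB (n : Int) : Bool :=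
  if n < 2 then false
  else if PySem.Int.mod n 2 = 0 then n == 2
  else isprimeGoB n 3

def dihedral_alt (number : Int) : Bool :=
  let s := PySem.Int.toChars number
  if s.any (fun c => !(flipB.lookup c).isSome) then false
  else
    -- the three int() parses always succeed here (nonempty digit strings); getD 0 for totality
    let rev := (PySem.Int.ofChars? s.reverse).getD 0
    let ud := (PySem.Int.ofChars?
      (PySem.Chars.join [] (s.map (fun c => (flipB.lookup c).getD [])))).getD 0
    let udrev := (PySem.Int.ofChars?
      (PySem.Chars.join [] (s.reverse.map (fun c => (flipB.lookup c).getD [])))).getD 0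
    isprimeB number && isprimeB rev && isprimeB ud && isprimeB udrev

-- ===== PRECONDITION & SPEC =====
-- A raises ValueError on every negative number (int() of the reversed string, which ends in '-').
def Pre_dihedral (number : Int) : Prop := 0 ≤ number
instance (number : Int) : Decidable (Pre_dihedral number) := by unfold Pre_dihedral; infer_instance
def pvWitness_dihedral : Int := 2

-- On negative numbers A raises ValueError (int of the reversed string '...-'); B returns False
-- since '-' is not a flippable character.
def Raises_dihedral (number : Int) : Prop := number < 0
instance (number : Int) : Decidable (Raises_dihedral number) := by unfold Raises_dihedral; infer_instance
def pvRaiseWitness_dihedral : Int := -2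
def pvRaiseWitnessOut_dihedral : Bool := false

def Spec_dihedral (number : Int) (out : Bool) : Prop := out = dihedral_alt number
instance (number : Int) (out : Bool) : Decidable (Spec_dihedral number out) := by unfold Spec_dihedral; infer_instance

-- ===== CLAIM (what is proved, stated in full; the proofs are below) =====
def Claim_equal_dihedral : Prop := ∀ (number : Int), Dom_dihedral number → Pre_dihedral number → Spec_dihedral number (dihedral number)
def Claim_raises_dihedral : Prop := (∀ (number : Int), Dom_dihedral number → Raises_dihedral number → ¬ Pre_dihedral number) ∧ (Dom_dihedral (pvRaiseWitness_dihedral) ∧ Raises_dihedral (pvRaiseWitness_dihedral) ∧ dihedral_alt (pvRaiseWitness_dihedral) = pvRaiseWitnessOut_dihedral)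

-- ===== LEMMAS AND PROOFS =====

def pvDigits : List Char := ['0','1','2','3','4','5','6','7','8','9']

theorem foldl_add_pos (L : List Int) (a : Int) (h : ∀ x ∈ L, 0 < x) :
    a ≤ L.foldl (· + ·) a ∧ (L.foldl (· + ·) a = a ↔ L = []) := by
  induction L generalizing a with
  | nil => simp
  | cons x t ih =>
    obtain ⟨h1, h2⟩ := ih (a + x) (fun y hy => h y (List.mem_cons_of_mem x hy))
    have hx : 0 < x := h x List.mem_cons_self
    refine ⟨by simpa using le_trans (by omega) h1, ?_⟩
    simp only [List.foldl_cons]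
    constructor
    · intro he; exfalso; omega
    · intro he; exact absurd he (by simp)

theorem primeA_iff (n : Int) :
    primeA n = true ↔ (2 ≤ n ∧ ∀ d : Int, 2 ≤ d → d * 2 ≤ n → ¬ d ∣ n) := by
  have hk2 : ∀ d : Int, d ≤ PySem.Int.floordiv n 2 ↔ d * 2 ≤ n :=
    fun d => PySem.Int.le_floordiv_iff_mul_le (by norm_num)
  have hfac : List.foldl (fun fs i => if PySem.Int.mod n (i + 1) = 0 then fs ++ [i + 1] else fs)
        [] (PySem.List.pyRange 0 (PySem.Int.floordiv n 2))
      = ((PySem.List.pyRange 0 (PySem.Int.floordiv n 2)).filter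
          (fun i => decide (PySem.Int.mod n (i + 1) = 0))).map (fun i => i + 1) := by
    rw [show (fun fs i => if PySem.Int.mod n (i + 1) = 0 then fs ++ [i + 1] else fs)
        = (fun (fs : List Int) i => if (fun i => decide (PySem.Int.mod n (i + 1) = 0)) i = true
            then fs ++ [(fun i => i + 1) i] else fs) from by funext fs i; simp]
    rw [PySem.List.foldl_append_if]
    simp
  simp only [primeA]
  rw [hfac, PySem.List.foldl_pyRange_zero_pyGetD _ 0 (fun a b => a + b) 0]
  rcases le_or_gt (PySem.Int.floordiv n 2) 0 with hk | hk
  · rw [PySem.List.pyRange_one_eq_nil hk]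
    simp only [List.filter_nil, List.map_nil, List.foldl_nil]
    constructor
    · intro h; exact absurd h (by decide)
    · rintro ⟨h2, -⟩; exact absurd ((hk2 1).mpr (by omega)) (by omega)
  · rw [PySem.List.pyRange_one_cons hk]
    have hp0 : (decide (PySem.Int.mod n (0 + 1) = 0)) = true := by
      simp [PySem.Int.mod]
    rw [List.filter_cons, if_pos hp0]
    simp only [List.map_cons, List.foldl_cons, beq_iff_eq]
    set L := ((PySem.List.pyRange (0 + 1) (PySem.Int.floordiv n 2)).filter
        (fun i => decide (PySem.Int.mod n (i + 1) = 0))).map (fun i => i + 1) with hL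
    have hpos : ∀ x ∈ L, 0 < x := by
      intro x hx
      rw [hL] at hx
      obtain ⟨i, hi, rfl⟩ := List.mem_map.mp hx
      have := PySem.List.mem_pyRange_one.mp (List.mem_of_mem_filter hi)
      omega
    obtain ⟨hle, hiff⟩ := foldl_add_pos L (0 + (0 + 1)) hpos
    constructor
    · intro h
      have hLnil : L = [] := by
        apply hiff.mp
        convert h using 2
      refine ⟨by have := (hk2 1).mp (by omega); omega, fun d hd hdn hdvd => ?_⟩
      have hmem : d - 1 ∈ (PySem.List.pyRange (0 + 1) (PySem.Int.floordiv n 2)) := by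
        rw [PySem.List.mem_pyRange_one]
        constructor
        · omega
        · have := (hk2 d).mpr hdn; omega
      have : d - 1 ∈ ((PySem.List.pyRange (0 + 1) (PySem.Int.floordiv n 2)).filter
          (fun i => decide (PySem.Int.mod n (i + 1) = 0))) := by
        apply List.mem_filter.mpr
        refine ⟨hmem, ?_⟩
        simp only [decide_eq_true_eq]
        rw [PySem.Int.mod_eq_zero_iff_dvd]
        convert hdvd using 2
        omega
      have : d ∈ L := by
        rw [hL]; exact List.mem_map.mpr ⟨d - 1, this, by omega⟩
      rw [hLnil] at this; exact absurd this (List.not_mem_nil)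
    · rintro ⟨h2, h⟩
      have hLnil : L = [] := by
        rw [hL]
        simp only [List.map_eq_nil_iff, List.filter_eq_nil_iff]
        intro i hi
        have hi' := PySem.List.mem_pyRange_one.mp hi
        simp only [decide_eq_true_eq]
        rw [PySem.Int.mod_eq_zero_iff_dvd]
        have := (hk2 (i + 1)).mp (by omega)
        exact h (i + 1) (by omega) this
      rw [hLnil]; simp

theorem isprimeGoB_iff (n d : Int) (hd : 1 ≤ d) :
    isprimeGoB n d = true ↔ ∀ e : Int, d ≤ e → (e - d) % 2 = 0 → e * e ≤ n → ¬ e ∣ n := by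
  revert hd
  induction d using isprimeGoB.induct (n := n) with
  | case1 d hdd hmod =>
    intro hd
    rw [isprimeGoB, if_pos hdd, if_pos hmod]
    constructor
    · intro h; exact absurd h (by simp)
    · intro h
      exact absurd ((PySem.Int.mod_eq_zero_iff_dvd n d).mp hmod) (h d le_rfl (by omega) hdd)
  | case2 d hdd hmod ih =>
    intro hd
    rw [isprimeGoB, if_pos hdd, if_neg hmod, ih (by omega)]
    constructor
    · intro h e he hpar hee
      rcases eq_or_lt_of_le he with rfl | hlt
      · rw [← PySem.Int.mod_eq_zero_iff_dvd]; exact hmod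
      · exact h e (by omega) (by omega) hee
    · intro h e he hpar hee
      exact h e (by omega) (by omega) hee
  | case3 d hdd =>
    intro hd
    rw [isprimeGoB, if_neg hdd]
    simp only [true_iff]
    intro e he hpar hee
    exact absurd hee (by have : d * d ≤ e * e := mul_le_mul he he (by omega) (by omega); omega)

theorem isprimeB_iff (n : Int) :
    isprimeB n = true ↔ (2 ≤ n ∧ ∀ d : Int, 2 ≤ d → d * 2 ≤ n → ¬ d ∣ n) := by
  unfold isprimeB
  by_cases h2 : n < 2
  · rw [if_pos h2]; simp; omega
  · rw [if_neg h2]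
    by_cases heven : PySem.Int.mod n 2 = 0
    · rw [if_pos heven]
      have hdvd : (2 : Int) ∣ n := (PySem.Int.mod_eq_zero_iff_dvd n 2).mp heven
      constructor
      · intro h
        have hn2 : n = 2 := by simpa using h
        exact ⟨by omega, fun d hd hdn hddvd => by
          have := Int.le_of_dvd (by omega) hddvd; omega⟩
      · rintro ⟨-, h⟩
        by_contra hne
        have hne2 : n ≠ 2 := by simpa using hne
        have hn4 : 4 ≤ n := by obtain ⟨k, rfl⟩ := hdvd; omega
        exact h 2 le_rfl (by omega) hdvd
    · rw [if_neg heven]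
      have hodd : ¬ (2 : Int) ∣ n := fun h => heven ((PySem.Int.mod_eq_zero_iff_dvd n 2).mpr h)
      rw [isprimeGoB_iff n 3 (by omega)]
      constructor
      · intro h
        refine ⟨by omega, fun d hd hdn hddvd => ?_⟩
        -- take m = min(d, n/d); m*m ≤ n, m ∣ n, m ≥ 2, m odd (else 2 ∣ n)
        obtain ⟨q, hq⟩ := id hddvd
        have hd0 : 0 < d := by omega
        have hq2 : 2 ≤ q := by nlinarith
        have hqd : q ∣ n := ⟨d, by linarith [hq, mul_comm d q]⟩
        rcases le_total d q with hle | hle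
        · have hmm : d * d ≤ n := by nlinarith
          have hodd' : d % 2 = 1 := by
            rcases Int.emod_two_eq d with h | h
            · exact absurd (dvd_trans ⟨d / 2, by omega⟩ hddvd) hodd
            · exact h
          exact h d (by omega) (by omega) hmm hddvd
        · have hmm : q * q ≤ n := by nlinarith
          have hodd' : q % 2 = 1 := by
            rcases Int.emod_two_eq q with h | h
            · exact absurd (dvd_trans ⟨q / 2, by omega⟩ hqd) hodd
            · exact h
          exact h q (by omega) (by omega) hmm hqd
      · rintro ⟨hn2, h⟩ e he hpar hee hdvd
        have : e * 2 ≤ n := by nlinarith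
        exact h e (by omega) this hdvd

theorem primeA_eq_isprimeB (n : Int) : primeA n = isprimeB n := by
  rw [Bool.eq_iff_iff, primeA_iff n, isprimeB_iff n]

theorem revFold_eq (s : List Char) :
    List.foldl (fun acc i => acc ++ [PySem.List.pyGetD s (-(i + 1)) ' '])
      [] (PySem.List.pyRange 0 (PySem.List.len s)) = s.reverse := by
  rw [PySem.List.foldl_append_singleton_eq_map]
  rw [List.nil_append, PySem.List.len_eq, PySem.List.pyRange_one, List.map_map]
  apply List.ext_getElem
  · simp
  · intro k h1 h2
    simp only [List.getElem_map, List.getElem_range, Function.comp_apply, List.getElem_reverse]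
    have hk : k < s.length := by simpa using h1
    have he : -(0 + ((k : Int)) + 1) = -(((k + 1 : Nat) : Int)) := by push_cast; ring
    rw [he, PySem.List.pyGetD_neg_natCast s (k + 1) ' ' (by omega) (by omega)]
    congr 1
    omega

theorem toDigitsCore_digits (fuel n : Nat) (ds : List Char) (hds : ∀ c ∈ ds, c ∈ pvDigits) :
    ∀ c ∈ Nat.toDigitsCore 10 fuel n ds, c ∈ pvDigits := by
  induction fuel generalizing n ds with
  | zero => simpa [Nat.toDigitsCore] using hds
  | succ fuel ih =>
    rw [Nat.toDigitsCore]
    have hd : (n % 10).digitChar ∈ pvDigits := by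
      have : n % 10 < 10 := Nat.mod_lt _ (by omega)
      interval_cases h : n % 10 <;> decide
    split
    · intro c hc
      rcases List.mem_cons.mp hc with rfl | hc
      · exact hd
      · exact hds c hc
    · exact ih _ _ (fun c hc => by
        rcases List.mem_cons.mp hc with rfl | hc
        · exact hd
        · exact hds c hc)

theorem toChars_digits (n : Int) (hn : 0 ≤ n) : ∀ c ∈ PySem.Int.toChars n, c ∈ pvDigits := by
  unfold PySem.Int.toChars
  rw [if_neg (by omega)]
  exact toDigitsCore_digits _ _ [] (by simp)

theorem udGoA_eq (s : List Char) :
    udGoA (s.zip (s.map (fun c => ((c.toNat : Int) - 48)))) =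
      if s.any (fun c => c ∈ (['4','3','9','7','6'] : List Char)) then none
      else some (s.map (fun c =>
        (if ((c.toNat : Int) - 48) = 5 then 2 else if ((c.toNat : Int) - 48) = 2 then 5
         else ((c.toNat : Int) - 48)))) := by
  induction s with
  | nil => simp [udGoA]
  | cons c t ih =>
    simp only [List.map_cons, List.zip_cons_cons, List.any_cons]
    rw [udGoA]
    by_cases hc : c = '4' ∨ c = '3' ∨ c = '9' ∨ c = '7' ∨ c = '6'
    · rw [if_pos hc]
      have hm : decide (c ∈ (['4','3','9','7','6'] : List Char)) = true :=
        decide_eq_true (by simp only [List.mem_cons, List.not_mem_nil, or_false]; tauto)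
      rw [hm, Bool.true_or, if_pos rfl]
    · rw [if_neg hc, ih]
      have hm : decide (c ∈ (['4','3','9','7','6'] : List Char)) = false :=
        decide_eq_false (by simp only [List.mem_cons, List.not_mem_nil, or_false]; tauto)
      rw [hm, Bool.false_or]
      by_cases ht : (t.any fun c => decide (c ∈ (['4','3','9','7','6'] : List Char))) = true
      · rw [if_pos ht, if_pos ht]
      · rw [Bool.not_eq_true] at ht
        rw [ht]
        rfl

theorem guard_eq (s : List Char) (hs : ∀ c ∈ s, c ∈ pvDigits) :
    s.any (fun c => !(flipB.lookup c).isSome) =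
      s.any (fun c => c ∈ (['4','3','9','7','6'] : List Char)) := by
  induction s with
  | nil => rfl
  | cons c t ih =>
    simp only [List.any_cons]
    rw [ih (fun x hx => hs x (List.mem_cons_of_mem c hx))]
    congr 1
    have hc := hs c List.mem_cons_self
    fin_cases hc <;> decide

theorem join_nil_cons (x : List Char) (xs : List (List Char)) :
    PySem.Chars.join [] (x :: xs) = x ++ PySem.Chars.join [] xs := by
  cases xs with
  | nil => rw [PySem.Chars.join_singleton, PySem.Chars.join_nil, List.append_nil]
  | cons y ys => rw [PySem.Chars.join_cons_cons]; simp

theorem flip_chars_eq (s : List Char) (hs : ∀ c ∈ s, c ∈ pvDigits)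
    (hgood : ¬ (s.any (fun c => c ∈ (['4','3','9','7','6'] : List Char))) = true) :
    (s.map (fun c =>
        (if ((c.toNat : Int) - 48) = 5 then 2 else if ((c.toNat : Int) - 48) = 2 then 5
         else ((c.toNat : Int) - 48)))).foldl (fun acc i => acc ++ PySem.Int.toChars i) [] =
      PySem.Chars.join [] (s.map (fun c => (flipB.lookup c).getD [])) := by
  rw [PySem.List.foldl_append_eq_flatMap, List.nil_append, List.flatMap_map]
  have hG : ∀ c ∈ s, c ∈ (['0','1','2','5','8'] : List Char) := by
    intro c hc
    have h1 := hs c hc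
    have h2 : ¬ (c ∈ (['4','3','9','7','6'] : List Char)) := by
      intro hmem
      exact hgood (List.any_eq_true.mpr ⟨c, hc, decide_eq_true hmem⟩)
    fin_cases h1 <;> first | rfl | decide | exact absurd (by decide) h2
  clear hs hgood
  induction s with
  | nil => rw [List.flatMap_nil, List.map_nil, PySem.Chars.join_nil]
  | cons c t ih =>
    rw [List.flatMap_cons, List.map_cons, join_nil_cons,
      ih (fun x hx => hG x (List.mem_cons_of_mem c hx))]
    congr 1
    have := hG c List.mem_cons_self
    fin_cases this <;> decide

theorem upsidedownA_eq (s : List Char) (hs : ∀ c ∈ s, c ∈ pvDigits) :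
    upsidedownA s =
      if s.any (fun c => c ∈ (['4','3','9','7','6'] : List Char)) then none
      else PySem.Int.ofChars?
        (PySem.Chars.join [] (s.map (fun c => (flipB.lookup c).getD []))) := by
  unfold upsidedownA
  dsimp only
  rw [udGoA_eq]
  by_cases hbad : (s.any (fun c => c ∈ (['4','3','9','7','6'] : List Char))) = true
  · rw [if_pos hbad, if_pos hbad]
  · rw [Bool.not_eq_true] at hbad
    rw [hbad]
    simp only [Bool.false_eq_true, if_false]
    rw [flip_chars_eq s hs (by rw [hbad]; exact Bool.false_ne_true)]

-- ===== VERDICT (by name: the statement is the Claim_ definition above) =====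
theorem dihedral_spec : Claim_equal_dihedral := by
  intro number _ hpre
  unfold Spec_dihedral Pre_dihedral at *
  have hs : ∀ c ∈ PySem.Int.toChars number, c ∈ pvDigits := toChars_digits number hpre
  have hsr : ∀ c ∈ (PySem.Int.toChars number).reverse, c ∈ pvDigits := by
    intro c hc; exact hs c (List.mem_reverse.mp hc)
  simp only [dihedral, dihedral_alt]
  rw [revFold_eq, guard_eq _ hs,
    upsidedownA_eq _ hs, upsidedownA_eq _ hsr, List.any_reverse]
  by_cases hbad : ((PySem.Int.toChars number).any
      (fun c => c ∈ (['4','3','9','7','6'] : List Char))) = true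
  · rw [hbad]
    simp only [if_true]
    rcases hparse : PySem.Int.ofChars? (PySem.Int.toChars number).reverse with _ | r
    · rfl
    · have h0 : primeA 0 = false := by decide
      simp [h0]
  · rw [Bool.not_eq_true] at hbad
    rw [hbad]
    simp only [Bool.false_eq_true, if_false]
    rcases hparse : PySem.Int.ofChars? (PySem.Int.toChars number).reverse with _ | r
    · have h0 : isprimeB 0 = false := by decide
      simp [h0]
    · simp only [Option.getD_some]
      rw [primeA_eq_isprimeB, primeA_eq_isprimeB, primeA_eq_isprimeB, primeA_eq_isprimeB]
      cases isprimeB number <;> cases isprimeB r <;>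
        cases isprimeB ((PySem.Int.ofChars? (PySem.Chars.join []
          (List.map (fun c => (flipB.lookup c).getD []) (PySem.Int.toChars number)))).getD 0) <;>
        cases isprimeB ((PySem.Int.ofChars? (PySem.Chars.join []
          (List.map (fun c => (flipB.lookup c).getD []) (PySem.Int.toChars number).reverse))).getD 0) <;>
        rfl

def dihedral_raises : Claim_raises_dihedral := by
  unfold Claim_raises_dihedral
  exact ⟨fun n _ h hp => by unfold Raises_dihedral at h; unfold Pre_dihedral at hp; omega,
    by decide⟩
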